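-- pv_equiv track=rewrite | github.com/Abdulganiev/python | oracle/report_GKV_kv.py | report_GKV_kv_data
-- ===== SOURCE A (Python) =====
-- def report_GKV_kv_data(d):
--     data = {
--              '№ п/п' : [],
--              'Категории получателей мер социальной поддержки' : [],
--              'Количество лиц, которым предоставлена социальная поддержка по оплате жилищно-коммунальных услуг (по сведениям органа государственной власти субъекта Российской Федерации), всего' : [],
--              'в том числе носители льгот' : [],
--              'Размер занимаемой общей площади' : [],
--             }
--
--     cnt = 0
--     for el in range(1, len(d[0])+1):
--         if el % 5 == 0 and el != 0:
--             data['Размер занимаемой общей площади'].append(d[0][el-1])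
--             cnt = 0
--         else:
--             if cnt == 0:
--                 data['№ п/п'].append(d[0][el-1])
--             elif cnt == 1:
--                 data['Категории получателей мер социальной поддержки'].append(d[0][el-1])
--             elif cnt == 2:
--                 data['Количество лиц, которым предоставлена социальная поддержка по оплате жилищно-коммунальных услуг (по сведениям органа государственной власти субъекта Российской Федерации), всего'].append(d[0][el-1])
--             elif cnt == 3:
--                 data['в том числе носители льгот'].append(d[0][el-1])
--             cnt += 1
--     return data
-- ===== SOURCE B (Python) =====
-- def report_GKV_kv_data(d):
--     seq = d[0]
--     return {
--         '№ п/п': list(seq[0::5]),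
--         'Категории получателей мер социальной поддержки': list(seq[1::5]),
--         'Количество лиц, которым предоставлена социальная поддержка по оплате жилищно-коммунальных услуг (по сведениям органа государственной власти субъекта Российской Федерации), всего': list(seq[2::5]),
--         'в том числе носители льгот': list(seq[3::5]),
--         'Размер занимаемой общей площади': list(seq[4::5]),
--     }
-- ===== Notes on version B (the rewrite author's own statement) =====
-- stated objective: simpler
-- what changed: Replaces the cyclic counter loop with its if/elif cascade by building the dict directly from five strided slices seq[k::5], one per column.
import Mathlib
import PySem

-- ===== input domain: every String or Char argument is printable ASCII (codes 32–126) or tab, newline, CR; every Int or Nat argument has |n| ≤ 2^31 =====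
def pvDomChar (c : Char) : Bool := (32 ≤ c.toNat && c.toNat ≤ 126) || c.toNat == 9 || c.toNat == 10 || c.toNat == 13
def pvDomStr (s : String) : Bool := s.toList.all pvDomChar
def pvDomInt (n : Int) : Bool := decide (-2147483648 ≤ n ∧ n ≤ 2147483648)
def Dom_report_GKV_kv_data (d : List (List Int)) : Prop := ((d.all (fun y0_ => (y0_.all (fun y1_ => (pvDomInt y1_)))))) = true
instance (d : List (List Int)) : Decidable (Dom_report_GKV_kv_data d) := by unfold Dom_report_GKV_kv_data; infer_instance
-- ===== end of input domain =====

-- B builds the result dict directly from five strided slices seq[k::5] instead of A's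
-- cyclic-counter loop with an if/elif cascade (objective: simpler; same O(n) cost).


-- ===== PORT A =====
-- the five column keys (shared by both ports, as in the Python sources)
def kvK0 : String := "№ п/п"
def kvK1 : String := "Категории получателей мер социальной поддержки"
def kvK2 : String := "Количество лиц, которым предоставлена социальная поддержка по оплате жилищно-коммунальных услуг (по сведениям органа государственной власти субъекта Российской Федерации), всего"
def kvK3 : String := "в том числе носители льгот"
def kvK4 : String := "Размер занимаемой общей площади"

-- one iteration of A's for-loop: state = (data, cnt), el the range variable
def kvStep (seq : List Int) (st : PySem.Dict String (List Int) × Int) (el : Int) :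
    PySem.Dict String (List Int) × Int :=
  let x := PySem.List.pyGetD seq (el - 1) 0
  if PySem.Int.mod el 5 = 0 ∧ el ≠ 0 then
    (st.1.modify kvK4 [] (· ++ [x]), 0)
  else
    (if st.2 = 0 then st.1.modify kvK0 [] (· ++ [x])
     else if st.2 = 1 then st.1.modify kvK1 [] (· ++ [x])
     else if st.2 = 2 then st.1.modify kvK2 [] (· ++ [x])
     else if st.2 = 3 then st.1.modify kvK3 [] (· ++ [x])
     else st.1,
     st.2 + 1)

def report_GKV_kv_data (d : List (List Int)) : List (String × List Int) :=
  let seq := PySem.List.pyGetD d 0 []   -- d[0]; d = [] raises IndexError, excluded by Pre_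
  let data : PySem.Dict String (List Int) :=
    PySem.Dict.mk [(kvK0, []), (kvK1, []), (kvK2, []), (kvK3, []), (kvK4, [])]
  ((PySem.List.pyRange 1 ((seq.length : Int) + 1) 1).foldl (kvStep seq) (data, 0)).1.items

-- ===== PORT B =====
def report_GKV_kv_data_alt (d : List (List Int)) : List (String × List Int) :=
  let seq := PySem.List.pyGetD d 0 []   -- d[0]; d = [] raises IndexError, excluded by Pre_
  [(kvK0, (PySem.List.slice? seq (some 0) none 5).getD []),
   (kvK1, (PySem.List.slice? seq (some 1) none 5).getD []),
   (kvK2, (PySem.List.slice? seq (some 2) none 5).getD []),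
   (kvK3, (PySem.List.slice? seq (some 3) none 5).getD []),
   (kvK4, (PySem.List.slice? seq (some 4) none 5).getD [])]

-- ===== PRECONDITION & SPEC =====
-- A evaluates d[0]: on d = [] it raises IndexError, so Pre_ excludes exactly the empty list.
def Pre_report_GKV_kv_data (d : List (List Int)) : Prop := d ≠ []
instance (d : List (List Int)) : Decidable (Pre_report_GKV_kv_data d) := by unfold Pre_report_GKV_kv_data; infer_instance
def pvWitness_report_GKV_kv_data : List (List Int) := [[7, -2, 3, 4, 5, 6, 1]]

def Spec_report_GKV_kv_data (d : List (List Int)) (out : List (String × List Int)) : Prop := out = report_GKV_kv_data_alt d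
instance (d : List (List Int)) (out : List (String × List Int)) : Decidable (Spec_report_GKV_kv_data d out) := by unfold Spec_report_GKV_kv_data; infer_instance

-- ===== CLAIM (what is proved, stated in full; the proofs are below) =====
def Claim_equal_report_GKV_kv_data : Prop := ∀ (d : List (List Int)), Dom_report_GKV_kv_data d → Pre_report_GKV_kv_data d → Spec_report_GKV_kv_data d (report_GKV_kv_data d)

-- ===== LEMMAS AND PROOFS =====

-- closed form of the step-5 slice seq[j::5]
lemma slice5 (xs : List Int) (j : Nat) :
    (PySem.List.slice? xs (some (j:Int)) none 5).getD []
    = (List.range (if j < xs.length then (xs.length - j + 4)/5 else 0)).filterMap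
        (fun k => xs[j + 5*k]?) := by
  unfold PySem.List.slice? PySem.List.sliceIndices
  simp only [show ¬((5:Int) = 0) by norm_num, if_false]
  norm_num
  have hnn : ¬ ((j:Int) < 0) := by omega
  simp only [hnn, if_false]
  by_cases h : j < xs.length
  · have hmin : min (j:Int) (xs.length:Int) = (j:Int) := by omega
    have h2 : (j:Int) < (xs.length:Int) := by exact_mod_cast h
    rw [hmin]
    simp only [h2, if_true, h, if_true]
    have hc : ((((xs.length:Int) - j) + 5 - 1) / 5).toNat = (xs.length - j + 4)/5 := by omega
    rw [hc]
    apply List.filterMap_congr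
    intro k _
    congr 1
  · have hmin : min (j:Int) (xs.length:Int) = (xs.length:Int) := by omega
    rw [hmin]
    simp [h]

-- appending one element extends exactly the stride of its position
lemma slice5_append (xs : List Int) (x : Int) (j : Nat) (hj : j < 5) :
    (PySem.List.slice? (xs ++ [x]) (some (j:Int)) none 5).getD []
    = if xs.length % 5 = j then (PySem.List.slice? xs (some (j:Int)) none 5).getD [] ++ [x]
      else (PySem.List.slice? xs (some (j:Int)) none 5).getD [] := by
  rw [slice5, slice5]
  simp only [List.length_append, List.length_singleton]
  by_cases hn : xs.length % 5 = j
  · simp only [hn, if_true]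
    have hlt : j < xs.length + 1 := by omega
    simp only [hlt, if_true]
    have hc0 : (if j < xs.length then (xs.length - j + 4) / 5 else 0) = (xs.length - j)/5 := by
      split <;> omega
    have hc1 : (xs.length + 1 - j + 4)/5 = (xs.length - j)/5 + 1 := by omega
    rw [hc0, hc1, List.range_succ, List.filterMap_append]
    congr 1
    · apply List.filterMap_congr
      intro k hk
      rw [List.mem_range] at hk
      rw [List.getElem?_append_left]
      omega
    · have hidx : j + 5 * ((xs.length - j)/5) = xs.length := by omega
      simp [hidx]
  · simp only [hn, if_false]
    by_cases hj2 : j < xs.length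
    · have hlt : j < xs.length + 1 := by omega
      simp only [hlt, if_true, hj2, if_true]
      have hc2 : (xs.length + 1 - j + 4)/5 = (xs.length - j + 4)/5 := by omega
      rw [hc2]
      apply List.filterMap_congr
      intro k hk
      rw [List.mem_range] at hk
      rw [List.getElem?_append_left]
      omega
    · have hje : ¬ (j < xs.length + 1) ∨ j = xs.length := by omega
      rcases hje with h | h
      · simp [h, hj2]
      · omega

-- the loop invariant / main characterisation of A's fold
set_option maxRecDepth 20000 in
lemma kvLoop (seq : List Int) :
    (PySem.List.pyRange 1 ((seq.length : Int) + 1) 1).foldl (kvStep seq)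
      (PySem.Dict.mk [(kvK0, []), (kvK1, []), (kvK2, []), (kvK3, []), (kvK4, [])], 0)
    = (PySem.Dict.mk
        [(kvK0, (PySem.List.slice? seq (some 0) none 5).getD []),
         (kvK1, (PySem.List.slice? seq (some 1) none 5).getD []),
         (kvK2, (PySem.List.slice? seq (some 2) none 5).getD []),
         (kvK3, (PySem.List.slice? seq (some 3) none 5).getD []),
         (kvK4, (PySem.List.slice? seq (some 4) none 5).getD [])],
       ((seq.length % 5 : Nat) : Int)) := by
  induction seq using List.reverseRecOn with
  | nil => decide
  | append_singleton ys x ih =>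
    have hlen : ((ys ++ [x]).length : Int) = (ys.length : Int) + 1 := by
      simp
    rw [hlen]
    rw [PySem.List.pyRange_one_succ_right (by omega : (1:Int) ≤ (ys.length:Int) + 1)]
    rw [List.foldl_append]
    -- congruence on the prefix of the loop
    have hcong : List.foldl (kvStep (ys ++ [x]))
        (PySem.Dict.mk [(kvK0, []), (kvK1, []), (kvK2, []), (kvK3, []), (kvK4, [])], 0)
        (PySem.List.pyRange 1 ((ys.length : Int) + 1) 1)
        = List.foldl (kvStep ys)
        (PySem.Dict.mk [(kvK0, []), (kvK1, []), (kvK2, []), (kvK3, []), (kvK4, [])], 0)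
        (PySem.List.pyRange 1 ((ys.length : Int) + 1) 1) := by
      apply PySem.List.foldl_congr_mem
      intro acc el hel
      rw [PySem.List.mem_pyRange_one] at hel
      unfold kvStep
      have hx : PySem.List.pyGetD (ys ++ [x]) (el - 1) 0 = PySem.List.pyGetD ys (el - 1) 0 := by
        rw [PySem.List.pyGetD_eq_getElem (ys ++ [x]) 0 (by omega) (by simp; omega),
            PySem.List.pyGetD_eq_getElem ys 0 (by omega) (by omega)]
        exact List.getElem_append_left (by omega)
      rw [hx]
    rw [hcong, ih]
    simp only [List.foldl_cons, List.foldl_nil]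
    unfold kvStep
    have hx : PySem.List.pyGetD (ys ++ [x]) ((ys.length : Int) + 1 - 1) 0 = x := by
      rw [PySem.List.pyGetD_eq_getElem (ys ++ [x]) 0 (by omega) (by simp)]
      simp
    simp only [hx]
    have h5 : PySem.Int.mod ((ys.length:Int) + 1) 5 = ((ys.length + 1) % 5 : Nat) := by
      rw [PySem.Int.mod_eq_emod_of_pos (by norm_num)]
      omega
    have hcases : ys.length % 5 = 0 ∨ ys.length % 5 = 1 ∨ ys.length % 5 = 2 ∨
        ys.length % 5 = 3 ∨ ys.length % 5 = 4 := by omega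
    have hA0 := slice5_append ys x 0 (by norm_num)
    have hA1 := slice5_append ys x 1 (by norm_num)
    have hA2 := slice5_append ys x 2 (by norm_num)
    have hA3 := slice5_append ys x 3 (by norm_num)
    have hA4 := slice5_append ys x 4 (by norm_num)
    norm_num at hA0 hA1 hA2 hA3 hA4
    have modK0 : ∀ (a0 a1 a2 a3 a4 : List Int) (f : List Int → List Int),
        (PySem.Dict.mk [(kvK0,a0),(kvK1,a1),(kvK2,a2),(kvK3,a3),(kvK4,a4)]).modify kvK0 [] f
        = PySem.Dict.mk [(kvK0,f a0),(kvK1,a1),(kvK2,a2),(kvK3,a3),(kvK4,a4)] := fun _ _ _ _ _ _ => rfl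
    have modK1 : ∀ (a0 a1 a2 a3 a4 : List Int) (f : List Int → List Int),
        (PySem.Dict.mk [(kvK0,a0),(kvK1,a1),(kvK2,a2),(kvK3,a3),(kvK4,a4)]).modify kvK1 [] f
        = PySem.Dict.mk [(kvK0,a0),(kvK1,f a1),(kvK2,a2),(kvK3,a3),(kvK4,a4)] := fun _ _ _ _ _ _ => rfl
    have modK2 : ∀ (a0 a1 a2 a3 a4 : List Int) (f : List Int → List Int),
        (PySem.Dict.mk [(kvK0,a0),(kvK1,a1),(kvK2,a2),(kvK3,a3),(kvK4,a4)]).modify kvK2 [] f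
        = PySem.Dict.mk [(kvK0,a0),(kvK1,a1),(kvK2,f a2),(kvK3,a3),(kvK4,a4)] := fun _ _ _ _ _ _ => rfl
    have modK3 : ∀ (a0 a1 a2 a3 a4 : List Int) (f : List Int → List Int),
        (PySem.Dict.mk [(kvK0,a0),(kvK1,a1),(kvK2,a2),(kvK3,a3),(kvK4,a4)]).modify kvK3 [] f
        = PySem.Dict.mk [(kvK0,a0),(kvK1,a1),(kvK2,a2),(kvK3,f a3),(kvK4,a4)] := fun _ _ _ _ _ _ => rfl
    have modK4 : ∀ (a0 a1 a2 a3 a4 : List Int) (f : List Int → List Int),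
        (PySem.Dict.mk [(kvK0,a0),(kvK1,a1),(kvK2,a2),(kvK3,a3),(kvK4,a4)]).modify kvK4 [] f
        = PySem.Dict.mk [(kvK0,a0),(kvK1,a1),(kvK2,a2),(kvK3,a3),(kvK4,f a4)] := fun _ _ _ _ _ _ => rfl
    rcases hcases with h | h | h | h | h <;>
      [ (have h' : (ys.length + 1) % 5 = 1 := by omega);
        (have h' : (ys.length + 1) % 5 = 2 := by omega);
        (have h' : (ys.length + 1) % 5 = 3 := by omega);
        (have h' : (ys.length + 1) % 5 = 4 := by omega);
        (have h' : (ys.length + 1) % 5 = 0 := by omega)] <;>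
      simp only [h] at hA0 hA1 hA2 hA3 hA4 ⊢ <;>
      norm_num at hA0 hA1 hA2 hA3 hA4 <;>
      rw [hA0, hA1, hA2, hA3, hA4, h5, h'] <;>
      norm_num [modK0, modK1, modK2, modK3, modK4]
    all_goals try omega
    rw [if_neg (by omega : ¬((ys.length:Int) + 1 = 0))]
    have hz : ((ys.length:Int) + 1) % 5 = 0 := by omega
    rw [hz]


-- ===== VERDICT (by name: the statement is the Claim_ definition above) =====
theorem report_GKV_kv_data_spec : Claim_equal_report_GKV_kv_data := by
  intro d _ _
  unfold Spec_report_GKV_kv_data report_GKV_kv_data report_GKV_kv_data_alt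
  simp only []
  rw [kvLoop]
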